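/- HAND-WRITTEN (farm/mkstatement.py generates `Calls` statements only; `_start` is not a function).
   THE STATEMENT of the proof unit `_start`: the stub of the base image (13 instructions, c/base/start.S) reaches `prog_exit` from a
   start state, given the contracts of its two callees. `prog_main` is a client of the heap: its contract's ghosts are the heap `H`,
   the other live objects `rest` and the protected frames. What the names mean: ProgX/Top.lean (`Top.StartOK`, `Top.StubReaches`),
   ProgX/Base/Spec/Basic.lean. The theorem to prove: `theorem start_ok : Toyh.Spec.start.Statement`. -/
import ProgX.Top
import Toyh.Spec.Toyh
namespace Toyh.Spec.start
open X86 X86.User Asan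

/-- The statement of unit `_start`. -/
def Statement : Prop :=
  ∀ (Lay : Layout) (_hLay : Lay.hi = 0x1000000) (μ : Microarch) (_hμ : UserX.MicroOK μ) (u₀ : State)
    (_hcode : HasCodeNat Lay u₀ ProgX.Base.L._start.entry ProgX.Base.Code.code__start.nat ProgX.Base.L._start.size)
    (_h_run_ctors : Calls Lay μ ProgX.Base.WayInv (ProgX.Base.conv u₀) ProgX.Base.L.run_ctors.entry (Asan.runCtorsSpec Toyh.Spec.rt))
    (_h_prog_main : ∀ (H : Heap) (rest : List Obj) (frames : List (Nat × FrameLayout)), Calls Lay μ ProgX.Base.WayInv (ProgX.Base.conv u₀) Toyh.L.prog_main.entry (Toyh.Spec.prog_main.spec H rest frames)),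
    ProgX.Top.StubReaches ProgX.Base.T ProgX.Base.L.exit Toyh.Spec.rt ProgX.Base.L._start.entry Toyh.Globals.objs Lay μ u₀

end Toyh.Spec.start
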